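-- pv_equiv track=rewrite | github.com/Bvk002/Dsa-Logical-Thinking-Programs | SumOfAllDigitsBetweenNumber.py | calculate_digit_sum
-- ===== SOURCE A (Python) =====
-- def calculate_digit_sum(N1, N2):
--     b=N1
--     a=N1
--     sum=0
--     diff = N2-N1
--     for i in range(1,(diff+2)):
--         while(a!=0):
--             lastd=a%10
--             sum=sum+lastd
--             a=a//10
--         a=b+i
--     return sum
-- ===== SOURCE B (Python) =====
-- def calculate_digit_sum(N1, N2):
--     def digit_sum(n):
--         s = 0
--         while n > 0:
--             s += n % 10
--             n //= 10
--         return s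
--
--     def S(n):
--         # sum of digit sums of all integers in [0, n]; 0 for n < 0
--         if n < 0:
--             return 0
--         if n < 10:
--             return n * (n + 1) // 2
--         q, r = divmod(n, 10)
--         return 45 * q + r * (r + 1) // 2 + 10 * S(q - 1) + (r + 1) * digit_sum(q)
--
--     if N2 < N1:
--         return 0
--     return S(N2) - S(N1 - 1)
-- ===== Notes on version B (the rewrite author's own statement) =====
-- stated objective: faster
-- what changed: Replaced the per-number digit-extraction loop over every integer in [N1,N2] by the closed-form digit-DP prefix function S(N) = digit sum of 0..N (one recursion per decimal digit), answering S(N2) - S(N1-1); Pre_ excludes N1 < 0 <= N2-side inputs on which A's inner while loop never terminates (a//10 keeps a negative number negative).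
import Mathlib
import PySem

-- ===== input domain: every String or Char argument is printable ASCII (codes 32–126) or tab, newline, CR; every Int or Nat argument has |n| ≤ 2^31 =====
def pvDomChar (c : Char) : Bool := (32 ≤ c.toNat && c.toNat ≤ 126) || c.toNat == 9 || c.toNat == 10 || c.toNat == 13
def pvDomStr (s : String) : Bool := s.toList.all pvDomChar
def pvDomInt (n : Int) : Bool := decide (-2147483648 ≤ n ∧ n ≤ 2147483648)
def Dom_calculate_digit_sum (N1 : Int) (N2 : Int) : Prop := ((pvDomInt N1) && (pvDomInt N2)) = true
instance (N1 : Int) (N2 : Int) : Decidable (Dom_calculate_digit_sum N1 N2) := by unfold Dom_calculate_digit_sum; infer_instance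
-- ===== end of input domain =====

-- B replaces A's per-number digit-extraction loop over [N1,N2] with the digit-DP
-- prefix sum S(N) (digit sum of 0..N in one recursion per decimal digit), answering
-- S(N2) - S(N1-1): a different, intended-to-be-faster algorithm (objective: faster).


-- ===== PORT A =====
-- the inner 'while a != 0' loop; the 'a < 0' branch only makes the function total:
-- there Python's loop never terminates (excluded by Pre_)
def pvWhileA (a sum : Int) : Int :=
  if a = 0 then sum
  else if a < 0 then sum
  else pvWhileA (PySem.Int.floordiv a 10) (sum + PySem.Int.mod a 10)
termination_by a.toNat
decreasing_by
  have h10 : PySem.Int.floordiv a 10 = a / 10 := PySem.Int.floordiv_eq_ediv_of_pos (by norm_num)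
  rw [h10]; omega

def calculate_digit_sum (N1 : Int) (N2 : Int) : Int :=
  let b := N1
  let diff := N2 - N1
  let st := (PySem.List.pyRange 1 (diff + 2) 1).foldl
    (fun (st : Int × Int) i => (pvWhileA st.2 st.1, b + i)) (0, N1)
  st.1

-- ===== PORT B =====
-- Source B's digit_sum: while n > 0 loop with accumulator s
def pvDSLoop (n s : Int) : Int :=
  if 0 < n then pvDSLoop (PySem.Int.floordiv n 10) (s + PySem.Int.mod n 10) else s
termination_by n.toNat
decreasing_by
  have h10 : PySem.Int.floordiv n 10 = n / 10 := PySem.Int.floordiv_eq_ediv_of_pos (by norm_num)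
  rw [h10]; omega

-- Source B's S: digit sum of all integers in [0, n]; 0 for n < 0
def pvS (n : Int) : Int :=
  if n < 0 then 0
  else if n < 10 then PySem.Int.floordiv (n * (n + 1)) 2
  else
    let q := PySem.Int.floordiv n 10
    let r := PySem.Int.mod n 10
    45 * q + PySem.Int.floordiv (r * (r + 1)) 2 + 10 * pvS (q - 1) + (r + 1) * pvDSLoop q 0
termination_by n.toNat
decreasing_by
  have h10 : PySem.Int.floordiv n 10 = n / 10 := PySem.Int.floordiv_eq_ediv_of_pos (by norm_num)
  rw [h10]; omega

def calculate_digit_sum_alt (N1 : Int) (N2 : Int) : Int :=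
  if N2 < N1 then 0 else pvS N2 - pvS (N1 - 1)

-- ===== PRECONDITION & SPEC =====
-- Pre_ excludes exactly the inputs (N1 < 0 and N1 ≤ N2) on which Python A never returns:
-- its inner 'while a != 0' loop diverges for negative a (a//10 keeps a negative).
def Pre_calculate_digit_sum (N1 : Int) (N2 : Int) : Prop := N2 < N1 ∨ 0 ≤ N1
instance (N1 : Int) (N2 : Int) : Decidable (Pre_calculate_digit_sum N1 N2) := by
  unfold Pre_calculate_digit_sum; infer_instance

def pvWitness_calculate_digit_sum : Int × Int := (7, 23)

def Spec_calculate_digit_sum (N1 : Int) (N2 : Int) (out : Int) : Prop := out = calculate_digit_sum_alt N1 N2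
instance (N1 : Int) (N2 : Int) (out : Int) : Decidable (Spec_calculate_digit_sum N1 N2 out) := by unfold Spec_calculate_digit_sum; infer_instance

-- ===== CLAIM (what is proved, stated in full; the proofs are below) =====
def Claim_equal_calculate_digit_sum : Prop := ∀ (N1 : Int) (N2 : Int), Dom_calculate_digit_sum N1 N2 → Pre_calculate_digit_sum N1 N2 → Spec_calculate_digit_sum N1 N2 (calculate_digit_sum N1 N2)

-- ===== LEMMAS AND PROOFS =====

-- mathematical reference: digit sum of a natural number
def pvds (n : Nat) : Nat := (Nat.digits 10 n).sum

-- prefix sum of digit sums: F n = Σ_{k ≤ n} pvds k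
def pvF (n : Nat) : Nat := ∑ k ∈ Finset.range (n + 1), pvds k

theorem pvds_zero : pvds 0 = 0 := rfl

theorem pvds_step (n : Nat) (h : 0 < n) : pvds n = n % 10 + pvds (n / 10) := by
  unfold pvds
  rw [Nat.digits_def' (by norm_num : 1 < 10) h]
  simp

theorem pvWhileA_eq (n : Nat) : ∀ s : Int, pvWhileA (n : Int) s = s + (pvds n : Int) := by
  induction n using Nat.strong_induction_on with
  | _ n ih =>
    intro s
    rw [pvWhileA]
    by_cases h0 : n = 0
    · simp [h0, pvds_zero]
    · have hpos : 0 < n := Nat.pos_of_ne_zero h0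
      have h1 : (n : Int) ≠ 0 := by exact_mod_cast h0
      have h2 : ¬ ((n : Int) < 0) := by omega
      rw [if_neg h1, if_neg h2]
      have hf : PySem.Int.floordiv (n : Int) 10 = ((n / 10 : Nat) : Int) := by
        exact_mod_cast PySem.Int.floordiv_natCast n 10
      have hm : PySem.Int.mod (n : Int) 10 = ((n % 10 : Nat) : Int) := by
        exact_mod_cast PySem.Int.mod_natCast n 10
      rw [hf, hm, ih (n / 10) (Nat.div_lt_self hpos (by norm_num)), pvds_step n hpos]
      push_cast; ring

theorem pvDSLoop_eq (n : Nat) : ∀ s : Int, pvDSLoop (n : Int) s = s + (pvds n : Int) := by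
  induction n using Nat.strong_induction_on with
  | _ n ih =>
    intro s
    rw [pvDSLoop]
    by_cases h0 : n = 0
    · simp [h0, pvds_zero]
    · have hpos : 0 < n := Nat.pos_of_ne_zero h0
      have h1 : (0 : Int) < (n : Int) := by exact_mod_cast hpos
      rw [if_pos h1]
      have hf : PySem.Int.floordiv (n : Int) 10 = ((n / 10 : Nat) : Int) := by
        exact_mod_cast PySem.Int.floordiv_natCast n 10
      have hm : PySem.Int.mod (n : Int) 10 = ((n % 10 : Nat) : Int) := by
        exact_mod_cast PySem.Int.mod_natCast n 10
      rw [hf, hm, ih (n / 10) (Nat.div_lt_self hpos (by norm_num)), pvds_step n hpos]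
      push_cast; ring

-- the digit-DP identity for the prefix sum
theorem pvF_key (n : Nat) :
    pvF n = 45 * (n / 10) + (n % 10) * (n % 10 + 1) / 2
            + 10 * pvF (n / 10 - 1) * (if n / 10 = 0 then 0 else 1)
            + (n % 10 + 1) * pvds (n / 10) := by
  induction n with
  | zero => simp [pvF, pvds_zero]
  | succ n ih =>
    have hstep : pvF (n + 1) = pvF n + pvds (n + 1) := by
      unfold pvF; rw [Finset.sum_range_succ]
    by_cases hr : n % 10 < 9
    · have hq : (n + 1) / 10 = n / 10 := by omega
      have hm : (n + 1) % 10 = n % 10 + 1 := by omega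
      have hds : pvds (n + 1) = n % 10 + 1 + pvds (n / 10) := by
        rw [pvds_step (n + 1) (by omega), hq, hm]
      rw [hstep, ih, hds, hq, hm]
      have h2 : (n % 10 + 1) * (n % 10 + 1 + 1) / 2 = (n % 10) * (n % 10 + 1) / 2 + (n % 10 + 1) := by
        have : n % 10 < 9 := hr
        interval_cases h : n % 10 <;> norm_num
      rw [h2]; ring
    · -- n % 10 = 9 : n + 1 = 10 * (n / 10 + 1)
      have hr9 : n % 10 = 9 := by omega
      have hq : (n + 1) / 10 = n / 10 + 1 := by omega
      have hm : (n + 1) % 10 = 0 := by omega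
      set q := n / 10 with hqdef
      have hds : pvds (n + 1) = pvds (q + 1) := by
        rw [pvds_step (n + 1) (by omega), hq, hm]; omega
      have hF0 : pvF 0 = 0 := by simp [pvF, pvds_zero]
      rw [hstep, ih, hds, hq, hm, hr9]
      rw [if_neg (Nat.succ_ne_zero q), Nat.add_sub_cancel, mul_one]
      by_cases hq0 : q = 0
      · rw [if_pos hq0, hq0]
        simp only [pvds_zero, hF0]
        omega
      · rw [if_neg hq0, mul_one] at *
        have hFq : pvF q = pvF (q - 1) + pvds q := by
          have hq1 : q - 1 + 1 = q := by omega
          calc pvF q = (∑ k ∈ Finset.range q, pvds k) + pvds q := by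
                unfold pvF; rw [Finset.sum_range_succ]
            _ = pvF (q - 1) + pvds q := by unfold pvF; rw [hq1]
        omega

-- pvS computes the prefix sum
theorem pvS_natCast (n : Nat) : pvS (n : Int) = (pvF n : Int) := by
  induction n using Nat.strong_induction_on with
  | _ n ih =>
    rw [pvS]
    have hnn : ¬ ((n : Int) < 0) := by omega
    rw [if_neg hnn]
    by_cases h10 : n < 10
    · have h10' : (n : Int) < 10 := by exact_mod_cast h10
      rw [if_pos h10']
      have hf : PySem.Int.floordiv ((n : Int) * ((n : Int) + 1)) 2 = ((n * (n + 1) / 2 : Nat) : Int) := by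
        have := PySem.Int.floordiv_natCast (n * (n + 1)) 2
        push_cast at this ⊢; exact this
      rw [hf]
      have hFn : pvF n = n * (n + 1) / 2 := by
        have hk := pvF_key n
        have hq0 : n / 10 = 0 := by omega
        have hm : n % 10 = n := by omega
        rw [hq0, hm] at hk
        simpa [pvds_zero] using hk
      rw [hFn]
    · have h10' : ¬ ((n : Int) < 10) := by exact_mod_cast h10
      rw [if_neg h10']
      simp only
      have hf : PySem.Int.floordiv (n : Int) 10 = ((n / 10 : Nat) : Int) := by
        exact_mod_cast PySem.Int.floordiv_natCast n 10
      have hm : PySem.Int.mod (n : Int) 10 = ((n % 10 : Nat) : Int) := by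
        exact_mod_cast PySem.Int.mod_natCast n 10
      rw [hf, hm]
      have hqpos : 1 ≤ n / 10 := by omega
      have hq1 : ((n / 10 : Nat) : Int) - 1 = ((n / 10 - 1 : Nat) : Int) := by
        push_cast [Nat.cast_sub hqpos]; ring
      rw [hq1, ih (n / 10 - 1) (by omega), pvDSLoop_eq (n / 10) 0]
      have hT : PySem.Int.floordiv (((n % 10 : Nat) : Int) * (((n % 10 : Nat) : Int) + 1)) 2
          = (((n % 10) * (n % 10 + 1) / 2 : Nat) : Int) := by
        have := PySem.Int.floordiv_natCast ((n % 10) * (n % 10 + 1)) 2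
        push_cast at this ⊢; exact this
      rw [hT]
      have hk := pvF_key n
      have hqne : ¬ (n / 10 = 0) := by omega
      rw [if_neg hqne, mul_one] at hk
      rw [hk]; push_cast; ring

theorem pvS_neg (n : Int) (h : n < 0) : pvS n = 0 := by
  rw [pvS, if_pos h]

-- A's fold over range(1, m+1) starting from (0, ↑n1) sums pvds (n1+k) for k < m
theorem pvFoldA (n1 : Nat) (m : Nat) :
    (PySem.List.pyRange 1 ((m : Int) + 1) 1).foldl
      (fun (st : Int × Int) i => (pvWhileA st.2 st.1, (n1 : Int) + i)) (0, (n1 : Int))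
    = (((∑ k ∈ Finset.range m, pvds (n1 + k) : Nat) : Int), (n1 : Int) + m) := by
  induction m with
  | zero =>
    rw [show ((0 : Nat) : Int) + 1 = 1 by norm_num, PySem.List.pyRange_one_eq_nil (by norm_num)]
    simp
  | succ m ih =>
    have hsplit : PySem.List.pyRange 1 (((m + 1 : Nat) : Int) + 1) 1
        = PySem.List.pyRange 1 ((m : Int) + 1) 1 ++ [(m : Int) + 1] := by
      rw [show (((m + 1 : Nat) : Int) + 1) = ((m : Int) + 1) + 1 by push_cast; ring]
      exact PySem.List.pyRange_one_succ_right (by omega)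
    rw [hsplit, List.foldl_append, ih]
    simp only [List.foldl_cons, List.foldl_nil]
    have hcast : (n1 : Int) + (m : Int) = ((n1 + m : Nat) : Int) := by push_cast; ring
    rw [hcast, pvWhileA_eq (n1 + m)]
    rw [Finset.sum_range_succ]
    refine Prod.ext ?_ ?_ <;> push_cast <;> ring

theorem calculate_digit_sum_eq_sum (n1 : Nat) (N2 : Int) (h : (n1 : Int) ≤ N2) :
    calculate_digit_sum (n1 : Int) N2
      = ((∑ k ∈ Finset.range (N2 - n1 + 1).toNat, pvds (n1 + k) : Nat) : Int) := by
  unfold calculate_digit_sum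
  simp only
  have hm : N2 - (n1 : Int) + 2 = ((N2 - n1 + 1).toNat : Int) + 1 := by omega
  rw [hm, pvFoldA n1 (N2 - n1 + 1).toNat]

-- splitting the prefix sum: pvF n2 = pvF (n1-1) + Σ_{k<m} pvds (n1+k), for 1 ≤ n1 ≤ n2
theorem pvF_split (n1 n2 : Nat) (h1 : 1 ≤ n1) (h2 : n1 ≤ n2) :
    pvF n2 = pvF (n1 - 1) + ∑ k ∈ Finset.range (n2 - n1 + 1), pvds (n1 + k) := by
  unfold pvF
  have hn : n2 + 1 = n1 + (n2 - n1 + 1) := by omega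
  have hn1 : n1 - 1 + 1 = n1 := by omega
  rw [hn1, hn, Finset.sum_range_add]

-- ===== VERDICT (by name: the statement is the Claim_ definition above) =====
theorem calculate_digit_sum_spec : Claim_equal_calculate_digit_sum := by
  intro N1 N2 _ hpre
  unfold Spec_calculate_digit_sum calculate_digit_sum_alt
  by_cases hlt : N2 < N1
  · rw [if_pos hlt]
    unfold calculate_digit_sum
    simp only
    rw [PySem.List.pyRange_one_eq_nil (by omega)]
    simp
  · rw [if_neg hlt]
    have hN1 : 0 ≤ N1 := by
      rcases hpre with h | h
      · exact absurd h hlt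
      · exact h
    have hle : N1 ≤ N2 := by omega
    obtain ⟨n1, rfl⟩ : ∃ n : Nat, N1 = (n : Int) := ⟨N1.toNat, by omega⟩
    obtain ⟨n2, rfl⟩ : ∃ n : Nat, N2 = (n : Int) := ⟨N2.toNat, by omega⟩
    have hle' : n1 ≤ n2 := by exact_mod_cast hle
    rw [calculate_digit_sum_eq_sum n1 (n2 : Int) hle, pvS_natCast n2]
    by_cases h0 : n1 = 0
    · subst h0
      rw [pvS_neg ((0 : Nat) - 1 : Int) (by norm_num), sub_zero]
      have hm : (((n2 : Int) - (0 : Nat) + 1)).toNat = n2 + 1 := by omega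
      rw [hm]
      unfold pvF
      norm_num
    · have h1 : 1 ≤ n1 := by omega
      have hc : ((n1 : Int) - 1) = ((n1 - 1 : Nat) : Int) := by omega
      rw [hc, pvS_natCast (n1 - 1)]
      have hm : (((n2 : Int) - n1 + 1)).toNat = n2 - n1 + 1 := by omega
      rw [hm, pvF_split n1 n2 h1 hle']
      push_cast; ring
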